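-- pv_equiv track=rewrite | github.com/diff3/BinaryPacketsDSL | utils/ParserUtils.py | remove_comments_and_reserved
-- ===== SOURCE A (Python) =====
-- def remove_comments_and_reserved(struct_definition: list[str]) -> list[str]:
--     """
--     Removes comments (single and multi-line) and reserved sections ('header:', 'data:')
--     from the provided structure definition.
--     """
--     new_list = []
--     i = 0
--
--     while i < len(struct_definition):
--         line = struct_definition[i].strip()
--
--         if line.startswith('#-'):
--             while i < len(struct_definition) and not struct_definition[i].strip().endswith("-#"):
--                 i += 1
--             i += 1
--             continue
--         elif line.startswith('#'):
--             i += 1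
--             continue
--         elif '#' in line:
--             line = line.split('#', 1)[0].strip()
--             if line:
--                 new_list.append(line)
--             i += 1
--             continue
--         elif line.startswith("header:") or line.startswith("data:") or line.startswith("variables:") or not line:
--             i += 1
--             continue
--         else:
--             new_list.append(struct_definition[i])
--             i += 1
--
--     return new_list
-- ===== SOURCE B (Python) =====
-- def remove_comments_and_reserved(struct_definition: list[str]) -> list[str]:
--     """
--     Removes comments (single and multi-line) and reserved sections ('header:', 'data:')
--     from the provided structure definition.
--     """
--     # Pass 1: drop block-comment regions with a boolean flag.
--     kept = []
--     in_block = False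
--     for raw in struct_definition:
--         s = raw.strip()
--         if in_block:
--             if s.endswith('-#'):
--                 in_block = False
--         elif s.startswith('#-'):
--             if not s.endswith('-#'):
--                 in_block = True
--         else:
--             kept.append(raw)
--     # Pass 2: line-comment / reserved-section filtering.
--     out = []
--     for raw in kept:
--         s = raw.strip()
--         if s.startswith('#'):
--             continue
--         if '#' in s:
--             t = s.split('#', 1)[0].strip()
--             if t:
--                 out.append(t)
--         elif not (s.startswith('header:') or s.startswith('data:') or s.startswith('variables:') or not s):
--             out.append(raw)
--     return out
-- ===== Notes on version B (the rewrite author's own statement) =====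
-- stated objective: simpler
-- what changed: Replaces A's index-based while loop with an inner lookahead scan for block-comment terminators by two flat passes: a boolean in_block flag pass that drops block-comment regions, then a per-line comment/reserved-section filter.
import Mathlib
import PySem

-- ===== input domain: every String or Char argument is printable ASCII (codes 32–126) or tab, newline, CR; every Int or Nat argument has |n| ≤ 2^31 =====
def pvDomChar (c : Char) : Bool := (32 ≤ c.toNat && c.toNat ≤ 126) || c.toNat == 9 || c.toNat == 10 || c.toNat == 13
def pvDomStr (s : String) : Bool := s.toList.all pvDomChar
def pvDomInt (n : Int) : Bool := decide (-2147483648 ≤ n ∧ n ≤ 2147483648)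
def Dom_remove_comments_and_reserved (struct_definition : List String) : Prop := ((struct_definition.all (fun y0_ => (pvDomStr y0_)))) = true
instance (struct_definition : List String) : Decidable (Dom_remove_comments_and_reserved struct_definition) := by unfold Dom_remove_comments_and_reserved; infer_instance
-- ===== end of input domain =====

-- B replaces A's index-based while loop with its inner lookahead scan by two flat passes
-- (a boolean-flag pass dropping block comments, then a per-line filtering pass); objective: simpler.

-- ===== PORT A =====
-- A's inner while: advance i past the block-comment lines up to and including the first line
-- whose stripped form ends with "-#" (or to the end of the list).
def pvSkipBlock (xs : List String) : List String :=
  match xs with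
  | [] => []
  | x :: rest =>
    if PySem.Str.endswith (PySem.Str.strip x) "-#" then rest else pvSkipBlock rest

theorem pvSkipBlock_length_le (xs : List String) : (pvSkipBlock xs).length ≤ xs.length := by
  induction xs with
  | nil => simp [pvSkipBlock]
  | cons x rest ih =>
    simp only [pvSkipBlock]
    split
    · simp
    · exact Nat.le_succ_of_le ih

def remove_comments_and_reserved (struct_definition : List String) : List String :=
  match struct_definition with
  | [] => []
  | x :: rest =>
    if PySem.Str.startswith (PySem.Str.strip x) "#-" then
      remove_comments_and_reserved (pvSkipBlock (x :: rest))
    else if PySem.Str.startswith (PySem.Str.strip x) "#" then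
      remove_comments_and_reserved rest
    else if PySem.Str.isIn "#" (PySem.Str.strip x) then
      -- line = line.split('#', 1)[0].strip()
      if PySem.Str.strip (((PySem.Str.splitMax? (PySem.Str.strip x) "#" 1).getD []).headD "") ≠ "" then
        PySem.Str.strip (((PySem.Str.splitMax? (PySem.Str.strip x) "#" 1).getD []).headD "") :: remove_comments_and_reserved rest
      else remove_comments_and_reserved rest
    else if PySem.Str.startswith (PySem.Str.strip x) "header:" || PySem.Str.startswith (PySem.Str.strip x) "data:" ||
            PySem.Str.startswith (PySem.Str.strip x) "variables:" || PySem.Str.strip x = "" then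
      remove_comments_and_reserved rest
    else
      x :: remove_comments_and_reserved rest
termination_by struct_definition.length
decreasing_by
  · have h := pvSkipBlock_length_le rest
    simp only [pvSkipBlock]
    split
    · simp
    · simpa using Nat.lt_succ_of_le h
  all_goals simp

-- ===== PORT B =====
-- pass 1: drop block-comment regions, carrying the in_block flag
def pvPass1 (inBlock : Bool) (xs : List String) : List String :=
  match xs with
  | [] => []
  | raw :: rest =>
    if inBlock then
      if PySem.Str.endswith (PySem.Str.strip raw) "-#" then pvPass1 false rest else pvPass1 true rest
    else if PySem.Str.startswith (PySem.Str.strip raw) "#-" then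
      if !(PySem.Str.endswith (PySem.Str.strip raw) "-#") then pvPass1 true rest else pvPass1 false rest
    else
      raw :: pvPass1 false rest

-- pass 2: line-comment / reserved-section filtering
def pvPass2 (xs : List String) : List String :=
  match xs with
  | [] => []
  | raw :: rest =>
    if PySem.Str.startswith (PySem.Str.strip raw) "#" then pvPass2 rest
    else if PySem.Str.isIn "#" (PySem.Str.strip raw) then
      if PySem.Str.strip (((PySem.Str.splitMax? (PySem.Str.strip raw) "#" 1).getD []).headD "") ≠ "" then
        PySem.Str.strip (((PySem.Str.splitMax? (PySem.Str.strip raw) "#" 1).getD []).headD "") :: pvPass2 rest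
      else pvPass2 rest
    else if !(PySem.Str.startswith (PySem.Str.strip raw) "header:" || PySem.Str.startswith (PySem.Str.strip raw) "data:" ||
              PySem.Str.startswith (PySem.Str.strip raw) "variables:" || PySem.Str.strip raw = "") then
      raw :: pvPass2 rest
    else
      pvPass2 rest

def remove_comments_and_reserved_alt (struct_definition : List String) : List String :=
  pvPass2 (pvPass1 false struct_definition)

-- ===== PRECONDITION & SPEC =====
def Spec_remove_comments_and_reserved (struct_definition : List String) (out : List String) : Prop := out = remove_comments_and_reserved_alt struct_definition
instance (struct_definition : List String) (out : List String) : Decidable (Spec_remove_comments_and_reserved struct_definition out) := by unfold Spec_remove_comments_and_reserved; infer_instance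

-- ===== CLAIM (what is proved, stated in full; the proofs are below) =====
def Claim_equal_remove_comments_and_reserved : Prop := ∀ (struct_definition : List String), Dom_remove_comments_and_reserved struct_definition → Spec_remove_comments_and_reserved struct_definition (remove_comments_and_reserved struct_definition)

-- ===== LEMMAS AND PROOFS =====

-- being inside a block is the same as restarting (out of a block) after the skip scan
theorem pvPass1_true_eq (xs : List String) :
    pvPass1 true xs = pvPass1 false (pvSkipBlock xs) := by
  induction xs with
  | nil => rfl
  | cons x rest ih =>
    by_cases h : PySem.Chars.endswith (PySem.Chars.strip x.toList) ['-', '#'] = true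
    · simp [pvPass1, pvSkipBlock, h]
    · simp [pvPass1, pvSkipBlock, h, ih]

theorem pvMain : ∀ (n : Nat) (xs : List String), xs.length ≤ n →
    remove_comments_and_reserved xs = pvPass2 (pvPass1 false xs) := by
  intro n
  induction n with
  | zero =>
    intro xs h
    have hx : xs = [] := List.length_eq_zero_iff.mp (Nat.le_zero.mp h)
    subst hx
    rw [remove_comments_and_reserved.eq_def]
    rfl
  | succ n ih =>
    intro xs h
    match xs with
    | [] =>
      rw [remove_comments_and_reserved.eq_def]
      rfl
    | x :: rest =>
      have hrest : rest.length ≤ n := by simpa using h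
      by_cases h1 : PySem.Chars.startswith (PySem.Chars.strip x.toList) ['#', '-'] = true
      · by_cases h2 : PySem.Chars.endswith (PySem.Chars.strip x.toList) ['-', '#'] = true
        · have hA : remove_comments_and_reserved (x :: rest) = remove_comments_and_reserved rest := by
            rw [remove_comments_and_reserved.eq_def]
            simp [pvSkipBlock, h1, h2]
          have hB : pvPass1 false (x :: rest) = pvPass1 false rest := by
            simp [pvPass1, h1, h2]
          rw [hA, hB]
          exact ih rest hrest
        · have hA : remove_comments_and_reserved (x :: rest) =
              remove_comments_and_reserved (pvSkipBlock rest) := by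
            rw [remove_comments_and_reserved.eq_def]
            simp [pvSkipBlock, h1, h2]
          have hB : pvPass1 false (x :: rest) = pvPass1 false (pvSkipBlock rest) := by
            simp [pvPass1, h1, h2, pvPass1_true_eq]
          rw [hA, hB]
          exact ih (pvSkipBlock rest) (le_trans (pvSkipBlock_length_le rest) hrest)
      · have hB : pvPass1 false (x :: rest) = x :: pvPass1 false rest := by
          simp [pvPass1, h1]
        rw [hB]
        rw [remove_comments_and_reserved.eq_def]
        simp only [pvPass2, ih rest hrest]
        by_cases h3 : PySem.Chars.startswith (PySem.Chars.strip x.toList) ['#'] = true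
        · simp [h1, h3]
        · by_cases h4 : PySem.Chars.isIn ['#'] (PySem.Chars.strip x.toList) = true
          · simp [h1, h3, h4]
          · simp [h1, h3, h4]
            by_cases h5 : ((PySem.Chars.startswith (PySem.Chars.strip x.toList) ['h','e','a','d','e','r',':'] = true ∨
                  PySem.Chars.startswith (PySem.Chars.strip x.toList) ['d','a','t','a',':'] = true) ∨
                  PySem.Chars.startswith (PySem.Chars.strip x.toList) ['v','a','r','i','a','b','l','e','s',':'] = true) ∨
                  PySem.Str.strip x = ""
            · rw [if_pos h5, if_neg (by
                rintro ⟨⟨⟨ha, hb⟩, hc⟩, hs⟩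
                rcases h5 with ((h | h) | h) | h
                · simp [h] at ha
                · simp [h] at hb
                · simp [h] at hc
                · exact hs h)]
            · rw [if_neg h5, if_pos (by
                push Not at h5
                exact ⟨⟨⟨Bool.eq_false_iff.mpr h5.1.1.1, Bool.eq_false_iff.mpr h5.1.1.2⟩,
                  Bool.eq_false_iff.mpr h5.1.2⟩, h5.2⟩)]

-- ===== VERDICT (by name: the statement is the Claim_ definition above) =====
theorem remove_comments_and_reserved_spec : Claim_equal_remove_comments_and_reserved := by
  intro xs _
  unfold Spec_remove_comments_and_reserved remove_comments_and_reserved_alt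
  exact pvMain xs.length xs le_rfl
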